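-- pv_equiv track=rewrite | github.com/abdiesu04/Codeforces | A2SV Contests/Contest #10/B_Progressive_Square.py | fn
-- ===== SOURCE A (Python) =====
-- def fn(a, k):
--     n = len(a)
--     tmp = [0] * n
--     for i in range(n - k + 1):
--         cur = a[i]
--         ops = 0
--         if i > 0:
--             ops += tmp[i - 1]
--         idx = max(0, i - k + 1)
--         if idx > 0:
--             ops -= tmp[idx - 1]
--         if ops % 2:
--             cur = 1 - cur
--         if i > 0:
--             tmp[i] = tmp[i - 1]
--         if cur == 0:
--             tmp[i] += 1
--
--     for i in range(n - k + 1, n):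
--         tmp[i] = tmp[i - 1]
--         cur = a[i]
--         ops = tmp[i - 1]
--         idx = max(0, i - k + 1)
--         if idx > 0:
--             ops -= tmp[idx - 1]
--         if ops % 2:
--             cur = 1 - cur
--         if cur == 0:
--             return False
--
--     return True
-- ===== SOURCE B (Python) =====
-- def fn(a, k):
--     n = len(a)
--     flips = [False] * n
--     parity = False
--     for i in range(n):
--         if i >= k and flips[i - k]:
--             parity = not parity
--         cur = a[i] if not parity else 1 - a[i]
--         if cur == 0:
--             if i <= n - k:
--                 flips[i] = True
--                 parity = not parity
--             else:
--                 return False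
--     return True
-- ===== Notes on version B (the rewrite author's own statement) =====
-- stated objective: simpler
-- what changed: Replaces the prefix-sum array tmp and the two separate index loops with a single pass keeping one running flip-parity bit over a sliding window of size k plus a boolean array marking where flips started; no prefix sums are built or subtracted.
import Mathlib
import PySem

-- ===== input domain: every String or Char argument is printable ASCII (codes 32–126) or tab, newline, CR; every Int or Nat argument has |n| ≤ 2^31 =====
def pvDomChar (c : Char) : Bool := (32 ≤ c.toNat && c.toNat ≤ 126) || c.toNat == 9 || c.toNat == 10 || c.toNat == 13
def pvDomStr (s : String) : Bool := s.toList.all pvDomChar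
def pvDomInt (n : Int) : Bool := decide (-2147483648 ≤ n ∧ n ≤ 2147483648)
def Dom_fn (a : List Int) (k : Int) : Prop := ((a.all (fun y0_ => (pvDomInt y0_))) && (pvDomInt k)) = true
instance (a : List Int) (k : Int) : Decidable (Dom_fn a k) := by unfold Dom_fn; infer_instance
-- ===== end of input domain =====

-- B replaces A's prefix-sum array and two index loops by a single pass with one running
-- flip-parity bit over a sliding window of size k (simpler decomposition, same O(n) cost).


-- ===== PORT A =====
-- body of A's first loop ('for i in range(n - k + 1)'), state = tmp
def fnStep1 (a : List Int) (k : Int) (tmp : List Int) (i : Int) : List Int :=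
  let cur := PySem.List.pyGetD a i 0
  let ops : Int := 0 + (if i > 0 then PySem.List.pyGetD tmp (i - 1) 0 else 0)
  let idx : Int := max 0 (i - k + 1)
  let ops := ops - (if idx > 0 then PySem.List.pyGetD tmp (idx - 1) 0 else 0)
  let cur := if PySem.Int.mod ops 2 ≠ 0 then 1 - cur else cur
  let tmp := if i > 0 then PySem.List.pySetD tmp i (PySem.List.pyGetD tmp (i - 1) 0) else tmp
  if cur = 0 then PySem.List.pySetD tmp i (PySem.List.pyGetD tmp i 0 + 1) else tmp

-- A's second loop ('for i in range(n - k + 1, n)'), early return False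
def fnLoop2 (a : List Int) (k : Int) : List Int → List Int → Bool
  | [], _ => true
  | i :: rest, tmp =>
    let tmp := PySem.List.pySetD tmp i (PySem.List.pyGetD tmp (i - 1) 0)
    let cur := PySem.List.pyGetD a i 0
    let ops := PySem.List.pyGetD tmp (i - 1) 0
    let idx : Int := max 0 (i - k + 1)
    let ops := ops - (if idx > 0 then PySem.List.pyGetD tmp (idx - 1) 0 else 0)
    let cur := if PySem.Int.mod ops 2 ≠ 0 then 1 - cur else cur
    if cur = 0 then false else fnLoop2 a k rest tmp

def fn (a : List Int) (k : Int) : Bool :=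
  let n : Int := a.length
  fnLoop2 a k (PySem.List.pyRange (n - k + 1) n 1)
    ((PySem.List.pyRange 0 (n - k + 1) 1).foldl (fnStep1 a k) (List.replicate a.length (0 : Int)))

-- ===== PORT B =====
-- B's single loop ('for i in range(n)'), state = (flips, parity), early return False
def fnAltLoop (a : List Int) (k : Int) (n : Int) : List Int → List Bool → Bool → Bool
  | [], _, _ => true
  | i :: rest, flips, parity =>
    let parity := if decide (k ≤ i) && PySem.List.pyGetD flips (i - k) false then !parity else parity
    let cur := if parity = false then PySem.List.pyGetD a i 0 else 1 - PySem.List.pyGetD a i 0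
    if cur = 0 then
      if i ≤ n - k then fnAltLoop a k n rest (PySem.List.pySetD flips i true) (!parity)
      else false
    else fnAltLoop a k n rest flips parity

def fn_alt (a : List Int) (k : Int) : Bool :=
  let n : Int := a.length
  fnAltLoop a k n (PySem.List.pyRange 0 n 1) (List.replicate a.length false) false

-- ===== PRECONDITION & SPEC =====
-- Pre_ excludes exactly the inputs on which A raises IndexError: k ≤ 0, k > 2*len(a)
-- (negative tmp index below -len), and the empty list with k ≠ 1; A returns on all of Pre_.
def Pre_fn (a : List Int) (k : Int) : Prop := 1 ≤ k ∧ k ≤ max (2 * (a.length : Int)) 1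
instance (a : List Int) (k : Int) : Decidable (Pre_fn a k) := by unfold Pre_fn; infer_instance
def pvWitness_fn : List Int × Int := ([0, 1, 0], 2)

def Spec_fn (a : List Int) (k : Int) (out : Bool) : Prop := out = fn_alt a k
instance (a : List Int) (k : Int) (out : Bool) : Decidable (Spec_fn a k out) := by unfold Spec_fn; infer_instance

-- ===== CLAIM (what is proved, stated in full; the proofs are below) =====
def Claim_equal_fn : Prop := ∀ (a : List Int) (k : Int), Dom_fn a k → Pre_fn a k → Spec_fn a k (fn a k)

-- ===== LEMMAS AND PROOFS =====

def pvCnt (flips : List Bool) (m : Nat) : Nat := (flips.take m).count true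

theorem pvCnt_mono (f : List Bool) {m m' : Nat} (h : m ≤ m') : pvCnt f m ≤ pvCnt f m' := by
  unfold pvCnt
  exact List.Sublist.count_le true (List.take_sublist_take_left h)

theorem pvCnt_succ (f : List Bool) (j : Nat) (hj : j < f.length) :
    pvCnt f (j + 1) = pvCnt f j + (if f.getD j false then 1 else 0) := by
  unfold pvCnt
  rw [List.take_add_one, List.count_append]
  congr 1
  rw [List.getElem?_eq_getElem hj]
  simp [List.getD, List.getElem?_eq_getElem hj]
  by_cases h : f[j] = true <;> simp [h]

theorem pvCnt_succ_false (f : List Bool) (j : Nat) (h : f.getD j false = false) :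
    pvCnt f (j + 1) = pvCnt f j := by
  by_cases hj : j < f.length
  · rw [pvCnt_succ f j hj, h]; simp
  · unfold pvCnt
    rw [List.take_of_length_le (by omega), List.take_of_length_le (by omega)]

theorem pvCnt_set_of_le (f : List Bool) (j : Nat) (v : Bool) {m : Nat} (h : m ≤ j) :
    pvCnt (f.set j v) m = pvCnt f m := by
  unfold pvCnt
  rw [List.take_set]
  rw [List.set_eq_of_length_le (by simp; omega)]

theorem pvCnt_set_succ (f : List Bool) (j : Nat) (hj : j < f.length) :
    pvCnt (f.set j true) (j + 1) = pvCnt f j + 1 := by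
  rw [pvCnt_succ _ j (by simp [hj]), pvCnt_set_of_le f j true (le_refl j)]
  simp [List.getD, hj]

def pvInv (a : List Int) (K : Nat) (i : Nat) (tmp : List Int) (flips : List Bool) (parity : Bool) : Prop :=
  tmp.length = a.length ∧ flips.length = a.length ∧
  (∀ j, i ≤ j → flips.getD j false = false) ∧
  (∀ j, i ≤ j → tmp.getD j 0 = 0) ∧
  (∀ j, j < i → tmp.getD j 0 = ((pvCnt flips (j + 1) : Nat) : Int)) ∧
  parity = decide ((pvCnt flips i - pvCnt flips (i - K)) % 2 = 1)

theorem pvOps_eq' (t : List Int) (flips : List Bool) (i K : Nat) (k : Int)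
    (hk : (K:Int) = k) (hK1 : 1 ≤ K) (hi1 : 1 ≤ i)
    (ht : ∀ j, j < i → t.getD j 0 = ((pvCnt flips (j+1) : Nat) : Int)) :
    PySem.List.pyGetD t ((i:Int) - 1) 0 -
      (if (0:Int) < max 0 ((i:Int) - k + 1) then PySem.List.pyGetD t (max 0 ((i:Int) - k + 1) - 1) 0 else 0)
    = ((pvCnt flips i - pvCnt flips (i + 1 - K) : Nat) : Int) := by
  have h1 : ((i:Int) - 1) = ((i - 1 : Nat) : Int) := by omega
  rw [h1, PySem.List.pyGetD_natCast]
  have ht1 : t.getD (i - 1) 0 = ((pvCnt flips i : Nat) : Int) := by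
    have h := ht (i - 1) (by omega)
    rwa [Nat.sub_add_cancel hi1] at h
  rw [ht1]
  by_cases hKi : K ≤ i
  · have hmax : max 0 ((i:Int) - k + 1) = ((i + 1 - K : Nat) : Int) := by omega
    rw [hmax, if_pos (by omega)]
    have h2 : ((i + 1 - K : Nat) : Int) - 1 = ((i - K : Nat) : Int) := by omega
    rw [h2, PySem.List.pyGetD_natCast]
    rw [ht (i - K) (by omega)]
    have he : i - K + 1 = i + 1 - K := by omega
    rw [he]
    have hmono := pvCnt_mono flips (show i + 1 - K ≤ i by omega)
    omega
  · rw [show max 0 ((i:Int) - k + 1) = 0 by omega, if_neg (by omega)]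
    rw [show i + 1 - K = 0 by omega]
    simp [pvCnt]

theorem pvParityB (flips : List Bool) (i K : Nat) (k : Int) (parity : Bool)
    (hk : (K:Int) = k) (hK1 : 1 ≤ K) (hlen : i < flips.length)
    (hpar : parity = decide ((pvCnt flips i - pvCnt flips (i - K)) % 2 = 1)) :
    (if decide (k ≤ (i:Int)) && PySem.List.pyGetD flips ((i:Int) - k) false then !parity else parity)
      = decide ((pvCnt flips i - pvCnt flips (i + 1 - K)) % 2 = 1) := by
  by_cases hKi : K ≤ i
  · rw [show ((i:Int) - k) = ((i - K : Nat) : Int) by omega, PySem.List.pyGetD_natCast]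
    rw [show decide (k ≤ (i:Int)) = true by simp; omega]
    by_cases hf : flips.getD (i - K) false = true
    · rw [hf]
      simp only [Bool.true_and, if_pos]
      have hsucc : pvCnt flips (i - K + 1) = pvCnt flips (i - K) + 1 := by
        rw [pvCnt_succ flips (i - K) (by omega), hf]; simp
      have he : i - K + 1 = i + 1 - K := by omega
      rw [he] at hsucc
      have hmono := pvCnt_mono flips (show i + 1 - K ≤ i by omega)
      have hmono2 := pvCnt_mono flips (show i - K ≤ i + 1 - K by omega)
      rw [hpar, ← decide_not]
      exact decide_eq_decide.mpr (by omega)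
    · rw [Bool.not_eq_true] at hf
      rw [hf]
      simp only [Bool.and_false, if_neg, Bool.false_eq_true, not_false_iff]
      have hsucc : pvCnt flips (i - K + 1) = pvCnt flips (i - K) := pvCnt_succ_false flips (i - K) hf
      rw [show i - K + 1 = i + 1 - K by omega] at hsucc
      rw [hpar, hsucc]
  · rw [show decide (k ≤ (i:Int)) = false by simp; omega]
    simp only [Bool.false_and, if_neg, Bool.false_eq_true, not_false_iff]
    rw [hpar, show i + 1 - K = i - K by omega]

theorem pvGetD_set_self {α : Type} (f : List α) (j : Nat) (v d : α) (h : j < f.length) :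
    (f.set j v).getD j d = v := by
  simp [List.getD, h]

theorem pvGetD_set_ne' {α : Type} (f : List α) (j m : Nat) (v d : α) (h : m ≠ j) :
    (f.set j v).getD m d = f.getD m d := by
  simp [List.getD]
  rw [List.getElem?_set_ne (Ne.symm h)]

theorem pvOps_eq (t : List Int) (flips : List Bool) (i K : Nat) (k : Int)
    (hk : (K:Int) = k) (hK1 : 1 ≤ K)
    (ht : ∀ j, j < i → t.getD j 0 = ((pvCnt flips (j+1) : Nat) : Int)) :
    (0 + (if (0:Int) < (i:Int) then PySem.List.pyGetD t ((i:Int) - 1) 0 else 0)) -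
      (if (0:Int) < max 0 ((i:Int) - k + 1) then PySem.List.pyGetD t (max 0 ((i:Int) - k + 1) - 1) 0 else 0)
    = ((pvCnt flips i - pvCnt flips (i + 1 - K) : Nat) : Int) := by
  by_cases hi : 1 ≤ i
  · rw [if_pos (by omega : (0:Int) < (i:Int)), zero_add]
    exact pvOps_eq' t flips i K k hk hK1 hi ht
  · have hi0 : i = 0 := by omega
    subst hi0
    rw [if_neg (by omega), if_neg (by omega)]
    rw [show (1:Nat) - K = 0 by omega]
    simp [pvCnt]

theorem pvInv_noflip (a : List Int) (K i : Nat) (tmp : List Int) (flips : List Bool) (parity : Bool)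
    (hInv : pvInv a K i tmp flips parity) (hi : i < a.length) :
    pvInv a K (i+1)
      (if (0:Int) < (i:Int) then PySem.List.pySetD tmp (i:Int) (PySem.List.pyGetD tmp ((i:Int) - 1) 0) else tmp)
      flips
      (decide ((pvCnt flips i - pvCnt flips (i + 1 - K)) % 2 = 1)) := by
  obtain ⟨hlt, hlf, hf0, ht0, htc, hp⟩ := hInv
  have hcf : pvCnt flips (i + 1) = pvCnt flips i := pvCnt_succ_false flips i (hf0 i (le_refl i))
  by_cases hi1 : 1 ≤ i
  · rw [if_pos (by omega : (0:Int) < (i:Int))]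
    rw [show ((i:Int) - 1) = ((i - 1 : Nat) : Int) by omega,
        PySem.List.pyGetD_natCast, PySem.List.pySetD_natCast]
    refine ⟨by simp [hlt], hlf, fun j hj => hf0 j (by omega), ?_, ?_, ?_⟩
    · intro j hj
      rw [pvGetD_set_ne' tmp i j _ 0 (by omega)]
      exact ht0 j (by omega)
    · intro j hj
      by_cases hji : j = i
      · subst hji
        rw [pvGetD_set_self tmp j _ 0 (by omega), hcf]
        have h := htc (j - 1) (by omega)
        rwa [Nat.sub_add_cancel hi1] at h
      · rw [pvGetD_set_ne' tmp i j _ 0 hji]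
        exact htc j (by omega)
    · rw [hcf, show i + 1 - K = i + 1 - K from rfl]
  · have hi0 : i = 0 := by omega
    subst hi0
    rw [if_neg (by omega)]
    refine ⟨hlt, hlf, fun j hj => hf0 j (by omega), fun j hj => ht0 j (by omega), ?_, ?_⟩
    · intro j hj
      have hj0 : j = 0 := by omega
      subst hj0
      rw [ht0 0 (le_refl 0), hcf]
      simp [pvCnt]
    · rw [hcf]

theorem pvInv_flip (a : List Int) (K i : Nat) (tmp : List Int) (flips : List Bool) (parity : Bool)
    (hK1 : 1 ≤ K)
    (hInv : pvInv a K i tmp flips parity) (hi : i < a.length) :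
    pvInv a K (i+1)
      (PySem.List.pySetD
        (if (0:Int) < (i:Int) then PySem.List.pySetD tmp (i:Int) (PySem.List.pyGetD tmp ((i:Int) - 1) 0) else tmp)
        (i:Int)
        (PySem.List.pyGetD
          (if (0:Int) < (i:Int) then PySem.List.pySetD tmp (i:Int) (PySem.List.pyGetD tmp ((i:Int) - 1) 0) else tmp)
          (i:Int) 0 + 1))
      (flips.set i true)
      (!(decide ((pvCnt flips i - pvCnt flips (i + 1 - K)) % 2 = 1))) := by
  obtain ⟨hlt, hlf, hf0, ht0, htc, hp⟩ := hInv
  have hiF : i < flips.length := by omega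
  -- the intermediate array t' and its value at i
  have htval : (if (0:Int) < (i:Int) then PySem.List.pySetD tmp (i:Int) (PySem.List.pyGetD tmp ((i:Int) - 1) 0) else tmp).getD i 0
      = ((pvCnt flips i : Nat) : Int) := by
    by_cases hi1 : 1 ≤ i
    · rw [if_pos (by omega : (0:Int) < (i:Int)),
          show ((i:Int) - 1) = ((i - 1 : Nat) : Int) by omega,
          PySem.List.pyGetD_natCast, PySem.List.pySetD_natCast,
          pvGetD_set_self tmp i _ 0 (by omega)]
      have h := htc (i - 1) (by omega)
      rwa [Nat.sub_add_cancel hi1] at h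
    · have hi0 : i = 0 := by omega
      subst hi0
      rw [if_neg (by omega), ht0 0 (le_refl 0)]
      simp [pvCnt]
  have hteq : ∀ j, j ≠ i →
      (if (0:Int) < (i:Int) then PySem.List.pySetD tmp (i:Int) (PySem.List.pyGetD tmp ((i:Int) - 1) 0) else tmp).getD j 0
      = tmp.getD j 0 := by
    intro j hj
    by_cases hi1 : 1 ≤ i
    · rw [if_pos (by omega : (0:Int) < (i:Int)), PySem.List.pySetD_natCast,
          pvGetD_set_ne' tmp i j _ 0 hj]
    · rw [if_neg (by omega)]
  have hlen : (if (0:Int) < (i:Int) then PySem.List.pySetD tmp (i:Int) (PySem.List.pyGetD tmp ((i:Int) - 1) 0) else tmp).length = tmp.length := by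
    by_cases hi1 : 1 ≤ i
    · rw [if_pos (by omega : (0:Int) < (i:Int)), PySem.List.pySetD_natCast, List.length_set]
    · rw [if_neg (by omega)]
  rw [PySem.List.pySetD_natCast]
  have hcnt1 : pvCnt (flips.set i true) (i + 1) = pvCnt flips i + 1 := pvCnt_set_succ flips i hiF
  refine ⟨by rw [List.length_set, hlen, hlt], by rw [List.length_set, hlf], ?_, ?_, ?_, ?_⟩
  · intro j hj
    rw [pvGetD_set_ne' flips i j _ false (by omega)]
    exact hf0 j (by omega)
  · intro j hj
    rw [pvGetD_set_ne' _ i j _ 0 (by omega), hteq j (by omega)]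
    exact ht0 j (by omega)
  · intro j hj
    by_cases hji : j = i
    · subst hji
      rw [pvGetD_set_self _ j _ 0 (by rw [hlen]; omega), PySem.List.pyGetD_natCast, htval, hcnt1]
      push_cast
      ring
    · rw [pvGetD_set_ne' _ i j _ 0 hji, hteq j hji,
          pvCnt_set_of_le flips i true (show j + 1 ≤ i by omega)]
      exact htc j (by omega)
  · rw [hcnt1, pvCnt_set_of_le flips i true (show i + 1 - K ≤ i by omega)]
    have hmono := pvCnt_mono flips (show i + 1 - K ≤ i by omega)
    rw [← decide_not]
    exact decide_eq_decide.mpr (by omega)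

theorem pvBridge2 (a : List Int) (k : Int) (K : Nat)
    (hk : (K:Int) = k) (hK1 : 1 ≤ K) (hKn : K ≤ a.length) :
    ∀ (m i : Nat) (tmp : List Int) (flips : List Bool) (parity : Bool),
      i + m = a.length → a.length + 1 ≤ i + K →
      pvInv a K i tmp flips parity →
      fnLoop2 a k (PySem.List.pyRange (i:Int) (a.length:Int) 1) tmp
        = fnAltLoop a k (a.length:Int) (PySem.List.pyRange (i:Int) (a.length:Int) 1) flips parity := by
  intro m
  induction m with
  | zero =>
    intro i tmp flips parity him hph hInv
    rw [PySem.List.pyRange_one_eq_nil (by omega)]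
    simp [fnLoop2, fnAltLoop]
  | succ m ih =>
    intro i tmp flips parity him hph hInv
    have hi : i < a.length := by omega
    have hi1 : 1 ≤ i := by omega
    obtain ⟨hlt, hlf, hf0, ht0, htc, hp⟩ := hInv
    rw [PySem.List.pyRange_one_cons (by omega : (i:Int) < (a.length:Int))]
    simp only [fnLoop2, fnAltLoop]
    -- rewrite the updated tmp reads
    have hset : PySem.List.pySetD tmp (i:Int) (PySem.List.pyGetD tmp ((i:Int) - 1) 0)
        = tmp.set i (PySem.List.pyGetD tmp ((i:Int) - 1) 0) := by
      rw [PySem.List.pySetD_natCast]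
    rw [hset]
    have htc' : ∀ j, j < i → (tmp.set i (PySem.List.pyGetD tmp ((i:Int) - 1) 0)).getD j 0
        = ((pvCnt flips (j+1) : Nat) : Int) := by
      intro j hj
      rw [pvGetD_set_ne' tmp i j _ 0 (by omega)]
      exact htc j hj
    rw [pvOps_eq' _ flips i K k hk hK1 hi1 htc']
    rw [pvParityB flips i K k parity hk hK1 (by omega) hp]
    rw [PySem.List.pyGetD_natCast a]
    have hm2 : PySem.Int.mod ((pvCnt flips i - pvCnt flips (i + 1 - K) : Nat) : Int) 2
        = (((pvCnt flips i - pvCnt flips (i + 1 - K)) % 2 : Nat) : Int) := by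
      exact_mod_cast PySem.Int.mod_natCast (pvCnt flips i - pvCnt flips (i + 1 - K)) 2
    rw [hm2]
    have hInv' : pvInv a K (i+1) (tmp.set i (PySem.List.pyGetD tmp ((i:Int) - 1) 0)) flips
        (decide ((pvCnt flips i - pvCnt flips (i + 1 - K)) % 2 = 1)) := by
      have h := pvInv_noflip a K i tmp flips parity ⟨hlt, hlf, hf0, ht0, htc, hp⟩ hi
      rw [if_pos (by omega : (0:Int) < (i:Int)), PySem.List.pySetD_natCast] at h
      exact h
    have hrec := ih (i+1) (tmp.set i (PySem.List.pyGetD tmp ((i:Int) - 1) 0)) flips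
        (decide ((pvCnt flips i - pvCnt flips (i + 1 - K)) % 2 = 1)) (by omega) (by omega) hInv'
    rw [show ((i:Int) + 1) = (((i+1 : Nat)) : Int) by push_cast; ring]
    by_cases hP : (pvCnt flips i - pvCnt flips (i + 1 - K)) % 2 = 1
    · rw [if_pos (by rw [hP]; simp : (((pvCnt flips i - pvCnt flips (i + 1 - K)) % 2 : Nat) : Int) ≠ 0)]
      rw [if_neg (by simp [hP] : ¬ decide ((pvCnt flips i - pvCnt flips (i + 1 - K)) % 2 = 1) = false)]
      by_cases hc : 1 - a.getD i 0 = 0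
      · rw [if_pos hc, if_pos hc, if_neg (by omega : ¬ (i:Int) ≤ (a.length:Int) - k)]
      · rw [if_neg hc, if_neg hc]
        exact hrec
    · rw [if_neg (by simp at hP ⊢; omega : ¬ (((pvCnt flips i - pvCnt flips (i + 1 - K)) % 2 : Nat) : Int) ≠ 0)]
      rw [if_pos (by simp [hP] : decide ((pvCnt flips i - pvCnt flips (i + 1 - K)) % 2 = 1) = false)]
      by_cases hc : a.getD i 0 = 0
      · rw [if_pos hc, if_pos hc, if_neg (by omega : ¬ (i:Int) ≤ (a.length:Int) - k)]
      · rw [if_neg hc, if_neg hc]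
        exact hrec

theorem pvBridge1 (a : List Int) (k : Int) (K : Nat)
    (hk : (K:Int) = k) (hK1 : 1 ≤ K) (hKn : K ≤ a.length) :
    ∀ (m i : Nat) (tmp : List Int) (flips : List Bool) (parity : Bool),
      i + m + K = a.length + 1 →
      pvInv a K i tmp flips parity →
      fnLoop2 a k (PySem.List.pyRange ((a.length:Int) - k + 1) (a.length:Int) 1)
        ((PySem.List.pyRange (i:Int) ((a.length:Int) - k + 1) 1).foldl (fnStep1 a k) tmp)
      = fnAltLoop a k (a.length:Int) (PySem.List.pyRange (i:Int) (a.length:Int) 1) flips parity := by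
  intro m
  induction m with
  | zero =>
    intro i tmp flips parity him hInv
    have hni : ((a.length:Int) - k + 1) = (i:Int) := by omega
    rw [hni, PySem.List.pyRange_one_eq_nil (le_refl (i:Int)), List.foldl_nil]
    exact pvBridge2 a k K hk hK1 hKn (a.length - i) i tmp flips parity (by omega) (by omega) hInv
  | succ m ih =>
    intro i tmp flips parity him hInv
    have hi : i < a.length := by omega
    have hiK : i + K ≤ a.length := by omega
    obtain ⟨hlt, hlf, hf0, ht0, htc, hp⟩ := hInv
    rw [PySem.List.pyRange_one_cons (by omega : (i:Int) < (a.length:Int) - k + 1), List.foldl_cons]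
    rw [PySem.List.pyRange_one_cons (by omega : (i:Int) < (a.length:Int))]
    simp only [fnAltLoop, fnStep1]
    rw [pvOps_eq tmp flips i K k hk hK1 htc]
    rw [pvParityB flips i K k parity hk hK1 (by omega) hp]
    rw [PySem.List.pyGetD_natCast a]
    have hm2 : PySem.Int.mod ((pvCnt flips i - pvCnt flips (i + 1 - K) : Nat) : Int) 2
        = (((pvCnt flips i - pvCnt flips (i + 1 - K)) % 2 : Nat) : Int) := by
      exact_mod_cast PySem.Int.mod_natCast (pvCnt flips i - pvCnt flips (i + 1 - K)) 2
    rw [hm2]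
    rw [show ((i:Int) + 1) = (((i+1 : Nat)) : Int) by push_cast; ring]
    have hrecflip := ih (i+1)
        (PySem.List.pySetD
          (if (0:Int) < (i:Int) then PySem.List.pySetD tmp (i:Int) (PySem.List.pyGetD tmp ((i:Int) - 1) 0) else tmp)
          (i:Int)
          (PySem.List.pyGetD
            (if (0:Int) < (i:Int) then PySem.List.pySetD tmp (i:Int) (PySem.List.pyGetD tmp ((i:Int) - 1) 0) else tmp)
            (i:Int) 0 + 1))
        (flips.set i true)
        (!(decide ((pvCnt flips i - pvCnt flips (i + 1 - K)) % 2 = 1)))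
        (by omega)
        (pvInv_flip a K i tmp flips parity hK1 ⟨hlt, hlf, hf0, ht0, htc, hp⟩ hi)
    have hrecno := ih (i+1)
        (if (0:Int) < (i:Int) then PySem.List.pySetD tmp (i:Int) (PySem.List.pyGetD tmp ((i:Int) - 1) 0) else tmp)
        flips
        (decide ((pvCnt flips i - pvCnt flips (i + 1 - K)) % 2 = 1))
        (by omega)
        (pvInv_noflip a K i tmp flips parity ⟨hlt, hlf, hf0, ht0, htc, hp⟩ hi)
    by_cases hP : (pvCnt flips i - pvCnt flips (i + 1 - K)) % 2 = 1
    · rw [if_pos (by rw [hP]; simp : (((pvCnt flips i - pvCnt flips (i + 1 - K)) % 2 : Nat) : Int) ≠ 0)]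
      rw [if_neg (by simp [hP] : ¬ decide ((pvCnt flips i - pvCnt flips (i + 1 - K)) % 2 = 1) = false)]
      by_cases hc : 1 - a.getD i 0 = 0
      · rw [if_pos hc, if_pos hc, if_pos (by omega : (i:Int) ≤ (a.length:Int) - k)]
        rw [PySem.List.pySetD_natCast flips]
        exact hrecflip
      · rw [if_neg hc, if_neg hc]
        exact hrecno
    · rw [if_neg (by simp at hP ⊢; omega : ¬ (((pvCnt flips i - pvCnt flips (i + 1 - K)) % 2 : Nat) : Int) ≠ 0)]
      rw [if_pos (by simp [hP] : decide ((pvCnt flips i - pvCnt flips (i + 1 - K)) % 2 = 1) = false)]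
      by_cases hc : a.getD i 0 = 0
      · rw [if_pos hc, if_pos hc, if_pos (by omega : (i:Int) ≤ (a.length:Int) - k)]
        rw [PySem.List.pySetD_natCast flips]
        exact hrecflip
      · rw [if_neg hc, if_neg hc]
        exact hrecno

theorem pvMain (a : List Int) (k : Int) (hk1 : 1 ≤ k) (hkn : k ≤ (a.length : Int)) :
    fn a k = fn_alt a k := by
  have hk : ((k.toNat : Nat) : Int) = k := by omega
  have hK1 : 1 ≤ k.toNat := by omega
  have hKn : k.toNat ≤ a.length := by omega
  have hInv0 : pvInv a k.toNat 0 (List.replicate a.length 0) (List.replicate a.length false) false := by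
    refine ⟨by simp, by simp, ?_, ?_, ?_, ?_⟩
    · intro j _
      simp [List.getD, List.getElem?_replicate]
      split <;> simp
    · intro j _
      simp [List.getD, List.getElem?_replicate]
      split <;> simp
    · intro j hj
      exact absurd hj (Nat.not_lt_zero j)
    · simp [pvCnt]
  have H := pvBridge1 a k k.toNat hk hK1 hKn (a.length + 1 - k.toNat) 0
      (List.replicate a.length 0) (List.replicate a.length false) false (by omega) hInv0
  unfold fn fn_alt
  simpa using H

theorem pvGetD_zero_replicate (n : Nat) (i : Int) :
    PySem.List.pyGetD (List.replicate n (0:Int)) i 0 = 0 := by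
  unfold PySem.List.pyGetD PySem.List.pyGet?
  cases h : PySem.List.pyIdx? (List.replicate n (0:Int)).length i with
  | none => simp
  | some m =>
    simp only [Option.bind_some]
    rw [List.getElem?_replicate]
    split <;> simp

theorem pvSetD_zero_replicate (n : Nat) (i : Int) :
    PySem.List.pySetD (List.replicate n (0:Int)) i 0 = List.replicate n 0 := by
  unfold PySem.List.pySetD PySem.List.pySet?
  cases h : PySem.List.pyIdx? (List.replicate n (0:Int)).length i with
  | none => simp
  | some m => simp [List.set_replicate_self]

theorem pvGetD_wrap (xs : List Int) (i : Int) (h1 : -(xs.length:Int) ≤ i) (h2 : i < 0) :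
    PySem.List.pyGetD xs i 0 = PySem.List.pyGetD xs (i + xs.length) 0 := by
  unfold PySem.List.pyGetD PySem.List.pyGet? PySem.List.pyIdx?
  rw [if_neg (by omega), if_pos h1, if_pos (by omega : (0:Int) ≤ i + xs.length),
      if_pos (by omega : i + (xs.length:Int) < (xs.length:Int))]
  have : xs.length - (-i).toNat = (i + (xs.length:Int)).toNat := by omega
  rw [this]

theorem pvLoop2_all (a : List Int) (k : Int) :
    ∀ (is : List Int),
      (∀ i ∈ is, -((a.length:Int)) ≤ i - 1 ∧ i - k + 1 ≤ 0) →
      fnLoop2 a k is (List.replicate a.length 0)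
        = is.all (fun i => !(decide (PySem.List.pyGetD a i 0 = 0))) := by
  intro is
  induction is with
  | nil => intro _; simp [fnLoop2]
  | cons i rest ih =>
    intro h
    obtain ⟨h1, h3⟩ := h i (by simp)
    simp only [fnLoop2]
    rw [pvGetD_zero_replicate, pvSetD_zero_replicate, pvGetD_zero_replicate]
    rw [if_neg (by omega : ¬ (0:Int) < max 0 (i - k + 1))]
    rw [show (0:Int) - 0 = 0 by ring]
    rw [if_neg (by decide : ¬ PySem.Int.mod (0:Int) 2 ≠ 0)]
    rw [List.all_cons]
    by_cases hc : PySem.List.pyGetD a i 0 = 0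
    · rw [if_pos hc, hc]
      simp
    · rw [if_neg hc, ih (fun j hj => h j (by simp [hj]))]
      simp [hc]

theorem pvAltLoop_all (a : List Int) (k : Int) (hk : (a.length:Int) < k) :
    ∀ (m i : Nat), i + m = a.length →
      fnAltLoop a k (a.length:Int) (PySem.List.pyRange (i:Int) (a.length:Int) 1)
          (List.replicate a.length false) false
        = (PySem.List.pyRange (i:Int) (a.length:Int) 1).all
            (fun j => !(decide (PySem.List.pyGetD a j 0 = 0))) := by
  intro m
  induction m with
  | zero =>
    intro i him
    rw [PySem.List.pyRange_one_eq_nil (by omega)]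
    simp [fnAltLoop]
  | succ m ih =>
    intro i him
    rw [PySem.List.pyRange_one_cons (by omega : (i:Int) < (a.length:Int))]
    simp only [fnAltLoop]
    have hpar : (if (decide (k ≤ (i:Int)) && PySem.List.pyGetD (List.replicate a.length false) ((i:Int) - k) false) then !false else false) = false := by
      rw [show decide (k ≤ (i:Int)) = false by simp; omega]
      simp
    rw [hpar, List.all_cons, if_pos rfl]
    by_cases hc : PySem.List.pyGetD a (i:Int) 0 = 0
    · rw [if_pos hc, if_neg (by omega : ¬ (i:Int) ≤ (a.length:Int) - k), hc]
      simp
    · rw [if_neg hc]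
      rw [show ((i:Int) + 1) = (((i+1 : Nat)) : Int) by push_cast; ring]
      rw [ih (i+1) (by omega)]
      rw [show decide (PySem.List.pyGetD a ((i:Nat):Int) 0 = 0) = false from decide_eq_false hc,
          Bool.not_false, Bool.true_and]

theorem pvMain2 (a : List Int) (k : Int) (hn : (a.length:Int) < k)
    (hk2 : k ≤ 2*(a.length:Int)) : fn a k = fn_alt a k := by
  simp only [fn, fn_alt]
  rw [PySem.List.pyRange_one_eq_nil (by omega : (a.length:Int) - k + 1 ≤ 0), List.foldl_nil]
  rw [pvLoop2_all a k _ (by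
    intro i hi
    rw [PySem.List.mem_pyRange_one] at hi
    constructor <;> omega)]
  have H := pvAltLoop_all a k hn a.length 0 (by omega)
  rw [Nat.cast_zero] at H
  rw [H]
  rw [PySem.List.pyRange_one_append ((a.length:Int) - k + 1) 0 (a.length:Int)
        (by omega) (by omega),
      List.all_append]
  cases hmain : (PySem.List.pyRange 0 (a.length:Int) 1).all
      (fun j => !(decide (PySem.List.pyGetD a j 0 = 0))) with
  | false => simp
  | true =>
    rw [Bool.and_true]
    rw [List.all_eq_true] at hmain ⊢
    intro i hi
    rw [PySem.List.mem_pyRange_one] at hi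
    rw [pvGetD_wrap a i (by omega) (by omega)]
    exact hmain (i + (a.length:Int)) (by rw [PySem.List.mem_pyRange_one]; omega)

-- ===== VERDICT (by name: the statement is the Claim_ definition above) =====
theorem fn_spec : Claim_equal_fn := by
  intro a k _ hpre
  unfold Pre_fn at hpre
  unfold Spec_fn
  obtain ⟨hp1, hp2⟩ := hpre
  by_cases hkn : k ≤ (a.length : Int)
  · exact pvMain a k hp1 hkn
  · by_cases hn0 : a.length = 0
    · have ha : a = [] := List.eq_nil_of_length_eq_zero hn0
      subst ha
      have hk1 : k = 1 := by simp at hp2; omega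
      subst hk1
      decide
    · exact pvMain2 a k (by omega) (by omega)
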